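-- pv_equiv track=rewrite | github.com/K-Diger/Algorithm | Programmers(Python)/Level1 Kakao Practice/ReportResult/main.py | solution
-- ===== SOURCE A (Python) =====
-- def solution(id_list, report, k):
--
--     id_dict = {item: 0 for item in id_list}
--     reported_dict = {item: 0 for item in id_list}
--     report = set(report)
--
--     # report_item 에는, "muzi frodo", "apeach frodo" ... 등 중복이 제거된, 공백으로 구분된 신고 정보가 담겨있음
--     for report_item in report:
--         # reported_dict 에 신고된 아이디를 Key 로 잡고, 그 Value 또한 1씩 증가시킴
--         reported_dict[report_item.split()[1]] += 1
--
--     for report_item in report: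
--         # 위 반복문에서 셋팅한 딕셔너리에
--         # reported_dict[report_item.split()[1] 에는 신고당한 유저들 아이디가 있다.
--         # 그래서, reported_dict 에서 신고당한 아이디를 Key 가지는 Value 를 뽑았을 때 그게 K보다 크면
--         if reported_dict[report_item.split()[1]] >= k:
--             # id_dict 에서 Key 에 해당하는 Value 를 1 증가시킨다.
--             id_dict[report_item.split()[0]] += 1
--
--     return list(id_dict.values())
--
-- id_list = ["muzi", "frodo", "apeach", "neo"]
--
-- report = ["muzi frodo", "apeach frodo", "frodo neo", "muzi neo", "apeach muzi"]
--
-- k = int(2)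
-- ===== SOURCE B (Python) =====
-- def solution(id_list, report, k):
--     # Group distinct report strings by the reported user, then tally in one pass
--     # over the groups instead of re-reading a counter per report item.
--     groups = {u: [] for u in id_list}
--     for item in set(report):
--         t = item.split()
--         groups[t[1]].append(t[0])
--     result = {u: 0 for u in id_list}
--     for reporters in groups.values():
--         if len(reporters) >= k:
--             for r in reporters:
--                 result[r] += 1
--     return list(result.values())
-- ===== Notes on version B (the rewrite author's own statement) =====
-- stated objective: alternative
-- what changed: A counts reports per reported user in one dict and then re-reads that counter for every deduplicated report item in a second scan; B instead groups the deduplicated reports into reported -> list-of-reporters in a single pass and tallies each group once when it reaches the threshold.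
import Mathlib
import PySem

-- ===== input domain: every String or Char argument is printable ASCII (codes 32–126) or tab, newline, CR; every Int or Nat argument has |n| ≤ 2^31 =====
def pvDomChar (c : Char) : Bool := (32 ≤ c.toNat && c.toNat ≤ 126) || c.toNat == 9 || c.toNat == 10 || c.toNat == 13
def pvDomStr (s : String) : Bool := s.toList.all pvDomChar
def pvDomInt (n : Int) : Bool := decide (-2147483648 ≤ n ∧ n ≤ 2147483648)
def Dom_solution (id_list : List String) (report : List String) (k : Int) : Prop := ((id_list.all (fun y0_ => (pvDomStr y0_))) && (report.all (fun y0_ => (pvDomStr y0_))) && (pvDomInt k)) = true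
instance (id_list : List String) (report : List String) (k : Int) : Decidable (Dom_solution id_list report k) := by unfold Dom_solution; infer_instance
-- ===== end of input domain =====

-- B replaces A's counter-plus-second-scan of the deduplicated report list by a single
-- group-by pass (reported -> list of reporters) tallied once; return values only (no
-- argument is mutated observably: A only rebinds its local 'report').

-- ===== PORT A =====
def solution (id_list : List String) (report : List String) (k : Int) : List Int :=
  -- id_dict = {item: 0 for item in id_list}; reported_dict likewise
  let id_dict : PySem.Dict String Int :=
    id_list.foldl (fun d item => d.insert item 0) PySem.Dict.empty
  let reported_dict : PySem.Dict String Int :=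
    id_list.foldl (fun d item => d.insert item 0) PySem.Dict.empty
  -- report = set(report)
  let rep : PySem.Set String := PySem.Set.ofList report
  -- for report_item in report: reported_dict[report_item.split()[1]] += 1
  -- (Python raises KeyError/IndexError outside Pre_; modify/getD are the total forms)
  let reported_dict :=
    rep.foldl (fun d r => d.modify (PySem.List.pyGetD (PySem.Str.split₀ r) 1 "") 0 (· + 1)) reported_dict
  -- for report_item in report: if reported_dict[...[1]] >= k: id_dict[...[0]] += 1
  let id_dict :=
    rep.foldl (fun d r =>
      if k ≤ reported_dict.getD (PySem.List.pyGetD (PySem.Str.split₀ r) 1 "") 0 then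
        d.modify (PySem.List.pyGetD (PySem.Str.split₀ r) 0 "") 0 (· + 1)
      else d) id_dict
  -- return list(id_dict.values())
  id_dict.values

-- ===== PORT B =====
def solution_alt (id_list : List String) (report : List String) (k : Int) : List Int :=
  -- groups = {u: [] for u in id_list}
  let groups : PySem.Dict String (List String) :=
    id_list.foldl (fun d u => d.insert u []) PySem.Dict.empty
  -- for item in set(report): t = item.split(); groups[t[1]].append(t[0])
  let groups :=
    (PySem.Set.ofList report).foldl (fun d r =>
      let t := PySem.Str.split₀ r
      d.modify (PySem.List.pyGetD t 1 "") [] (· ++ [PySem.List.pyGetD t 0 ""])) groups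
  -- result = {u: 0 for u in id_list}
  let result : PySem.Dict String Int :=
    id_list.foldl (fun d u => d.insert u 0) PySem.Dict.empty
  -- for reporters in groups.values(): if len(reporters) >= k: for r in reporters: result[r] += 1
  let result :=
    groups.values.foldl (fun d l =>
      if k ≤ (l.length : Int) then l.foldl (fun d r => d.modify r 0 (· + 1)) d else d) result
  -- return list(result.values())
  result.values

-- ===== PRECONDITION & SPEC =====
-- Pre_: exactly the inputs on which A returns. A raises IndexError when a report entry
-- has fewer than two whitespace tokens, KeyError when a reported id is not in id_list,
-- and KeyError when a reporter id is not in id_list AND its reported user's deduplicated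
-- report count reaches k (below k that branch never fires and A returns normally, so
-- such inputs are admitted).
def Pre_solution (id_list : List String) (report : List String) (k : Int) : Prop :=
  ∀ r ∈ report,
    2 ≤ (PySem.Str.split₀ r).length ∧
    PySem.List.pyGetD (PySem.Str.split₀ r) 1 "" ∈ id_list ∧
    (k ≤ (((PySem.Set.ofList report).map (fun s => PySem.List.pyGetD (PySem.Str.split₀ s) 1 "")).count
            (PySem.List.pyGetD (PySem.Str.split₀ r) 1 "") : Int) →
      PySem.List.pyGetD (PySem.Str.split₀ r) 0 "" ∈ id_list)
instance (id_list : List String) (report : List String) (k : Int) : Decidable (Pre_solution id_list report k) := by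
  unfold Pre_solution; infer_instance

def pvWitness_solution : List String × List String × Int :=
  (["muzi", "frodo", "apeach", "neo"],
   ["muzi frodo", "apeach frodo", "frodo neo", "muzi neo", "apeach muzi"], 2)

def Spec_solution (id_list : List String) (report : List String) (k : Int) (out : List Int) : Prop := out = solution_alt id_list report k
instance (id_list : List String) (report : List String) (k : Int) (out : List Int) : Decidable (Spec_solution id_list report k out) := by unfold Spec_solution; infer_instance

-- ===== CLAIM (what is proved, stated in full; the proofs are below) =====
def Claim_equal_solution : Prop := ∀ (id_list : List String) (report : List String) (k : Int), Dom_solution id_list report k → Pre_solution id_list report k → Spec_solution id_list report k (solution id_list report k)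

-- ===== LEMMAS AND PROOFS =====

-- a dict seeded with a constant value c reads back c everywhere (under default c)
theorem getD_seed {ν : Type} (l : List String) (c : ν) (x : String)
    (d : PySem.Dict String ν) (h : d.getD x c = c) :
    (l.foldl (fun d u => d.insert u c) d).getD x c = c := by
  induction l generalizing d with
  | nil => exact h
  | cons a t ih =>
      exact ih _ (by rw [PySem.Dict.getD_insert]; split <;> simp [h])

-- Set.update adds nothing when every new element is already present
theorem set_update_of_mem {α : Type} [BEq α] [LawfulBEq α] (s : PySem.Set α) (xs : List α)
    (h : ∀ x ∈ xs, x ∈ s) : PySem.Set.update s xs = s := by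
  induction xs generalizing s with
  | nil => rfl
  | cons a t ih =>
      have ha : PySem.Set.add s a = s := by
        simp [PySem.Set.add, PySem.Set.contains, h a (by simp)]
      show PySem.Set.update (PySem.Set.add s a) t = s
      rw [ha]; exact ih s (fun x hx => h x (by simp [hx]))

-- counting u in a map is counting preimages
theorem count_map_eq_countP {α κ : Type} [BEq κ] [LawfulBEq κ] (l : List α) (f : α → κ) (u : κ) :
    (l.map f).count u = l.countP (fun r => f r == u) := by
  simp [List.count, List.countP_map]; rfl

-- a single indicator summed over a nodup list hitting y once
theorem sum_ite_mem {κ : Type} [BEq κ] [LawfulBEq κ] (ys : List κ) (y : κ) (b : Bool)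
    (hnd : ys.Nodup) (hy : y ∈ ys) :
    (ys.map (fun z => if (y == z) && b then 1 else 0)).sum = if b then 1 else 0 := by
  induction ys with
  | nil => cases hy
  | cons a t ih =>
      simp only [List.map_cons, List.sum_cons]
      rcases List.mem_cons.mp hy with h | h
      · subst h
        have hz : (t.map (fun z => if (y == z) && b then 1 else 0)).sum = 0 := by
          apply List.sum_eq_zero; intro n hn
          rcases List.mem_map.mp hn with ⟨z, hz, rfl⟩
          have : ¬ (y == z) = true := by
            intro hyz; exact (List.nodup_cons.mp hnd).1 (by rw [eq_of_beq hyz]; exact hz)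
          simp [this]
        simp [hz]
      · have hne : ¬ (y == a) = true := by
          intro hya; exact (List.nodup_cons.mp hnd).1 (by rw [← eq_of_beq hya]; exact h)
        rw [ih (List.nodup_cons.mp hnd).2 h]; simp [hne]

-- the grouped, threshold-filtered count equals the flat filtered count
theorem grouped_count {α κ : Type} [BEq κ] [LawfulBEq κ] (l : List α) (ys : List κ)
    (f : α → κ) (c : κ → Bool) (q : α → Bool)
    (hnd : ys.Nodup) (hmem : ∀ r ∈ l, c (f r) = true → f r ∈ ys) :
    (ys.map (fun y => if c y then (l.filter (fun r => f r == y)).countP q else 0)).sum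
      = l.countP (fun r => c (f r) && q r) := by
  induction l with
  | nil => simp
  | cons a t ih =>
      have hmt : ∀ r ∈ t, c (f r) = true → f r ∈ ys :=
        fun r hr => hmem r (List.mem_cons_of_mem a hr)
      by_cases hca : c (f a) = true
      · have hfa : f a ∈ ys := hmem a List.mem_cons_self hca
        have step : (fun y => if c y then (((a :: t).filter (fun r => f r == y)).countP q) else 0)
            = fun y => (if c y then (t.filter (fun r => f r == y)).countP q else 0)
                + (if (f a == y) && q a then 1 else 0) := by
          funext y
          by_cases hfy : (f a == y) = true
          · have : c y = true := by rw [← eq_of_beq hfy]; exact hca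
            simp [hfy, this, List.countP_cons]
          · by_cases hcy : c y = true <;> simp [hfy, hcy]
        rw [step, List.sum_map_add, ih hmt,
            sum_ite_mem ys (f a) (q a) hnd hfa, List.countP_cons]
        simp [hca]
      · have step : (fun y => if c y then (((a :: t).filter (fun r => f r == y)).countP q) else 0)
            = fun y => if c y then (t.filter (fun r => f r == y)).countP q else 0 := by
          funext y
          by_cases hfy : (f a == y) = true
          · have : c y = false := by rw [← eq_of_beq hfy]; simpa using hca
            simp [this]
          · by_cases hcy : c y = true <;> simp [hfy, hcy]
        rw [step, ih hmt, List.countP_cons]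
        simp [hca]

-- sum over a filtered list as a sum of guarded terms
theorem sum_map_filter_ite {κ : Type} (xs : List κ) (c : κ → Bool) (h : κ → Nat) :
    ((xs.filter c).map h).sum = (xs.map (fun y => if c y then h y else 0)).sum := by
  induction xs with
  | nil => rfl
  | cons a t ih => by_cases hc : c a = true <;> simp [hc, ih]

-- the counting loop 'd[f r] += 1' reads back the count of preimages
theorem getD_count_loop (l : List String) (f : String → String)
    (d : PySem.Dict String Int) (y : String) :
    (l.foldl (fun d r => d.modify (f r) 0 (· + 1)) d).getD y 0
      = d.getD y 0 + ((l.map f).count y : Int) := by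
  induction l generalizing d with
  | nil => simp
  | cons a t ih =>
      rw [List.foldl_cons, ih, PySem.Dict.getD_modify]
      by_cases h : y = f a
      · subst h
        simp
        ring
      · have hba : ¬ ((f a == y) = true) := by simp [beq_iff_eq]; exact fun e => h e.symm
        simp [List.count_cons, h, hba]

-- the grouping loop 'd[f r].append(g r)' reads back the group of y, in order
theorem getD_append_loop (l : List String) (f g : String → String)
    (d : PySem.Dict String (List String)) (y : String) :
    (l.foldl (fun d r => d.modify (f r) [] (· ++ [g r])) d).getD y []
      = d.getD y [] ++ (l.filter (fun r => f r == y)).map g := by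
  induction l generalizing d with
  | nil => simp
  | cons a t ih =>
      rw [List.foldl_cons, ih, PySem.Dict.getD_modify]
      by_cases h : y = f a
      · subst h
        simp
      · have hba : ¬ ((f a == y) = true) := by simp [beq_iff_eq]; exact fun e => h e.symm
        simp [h, hba]

-- the main equivalence
theorem main_eq (id_list report : List String) (k : Int)
    (hpre : Pre_solution id_list report k) :
    solution id_list report k = solution_alt id_list report k := by
  simp only [solution, solution_alt]
  set rep := PySem.Set.ofList report with hrep
  set ids := PySem.Set.ofList id_list with hids
  have hpre1 : ∀ r ∈ rep, PySem.List.pyGetD (PySem.Str.split₀ r) 1 "" ∈ id_list := by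
    intro r hr
    exact (hpre r ((PySem.Set.mem_ofList report r).mp hr)).2.1
  have hpre0 : ∀ r ∈ rep,
      k ≤ ((rep.map (fun s => PySem.List.pyGetD (PySem.Str.split₀ s) 1 "")).count
            (PySem.List.pyGetD (PySem.Str.split₀ r) 1 "") : Int) →
      PySem.List.pyGetD (PySem.Str.split₀ r) 0 "" ∈ id_list := by
    intro r hr hk
    exact (hpre r ((PySem.Set.mem_ofList report r).mp hr)).2.2 hk
  set seedI := id_list.foldl (fun d item => d.insert item (0 : Int)) PySem.Dict.empty with hseedI
  set seedL := id_list.foldl (fun d u => d.insert u ([] : List String)) PySem.Dict.empty with hseedL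
  have hseedIv : ∀ y, seedI.getD y 0 = 0 := by
    intro y; exact getD_seed id_list 0 y _ (PySem.Dict.getD_empty y 0)
  have hseedLv : ∀ y, seedL.getD y [] = [] := by
    intro y; exact getD_seed id_list [] y _ (PySem.Dict.getD_empty y [])
  have hseedIk : seedI.keys = ids := by
    rw [hseedI, PySem.Dict.keys_foldl_insert id_list (fun _ _ => (0 : Int)) PySem.Dict.empty,
        PySem.Dict.keys_empty, PySem.Set.update_nil_left]
  have hseedLk : seedL.keys = ids := by
    rw [hseedL, PySem.Dict.keys_foldl_insert id_list (fun _ _ => ([] : List String)) PySem.Dict.empty,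
        PySem.Dict.keys_empty, PySem.Set.update_nil_left]
  -- group-size = deduplicated count of the reported user (used on both sides)
  have hlen : ∀ y, ((rep.filter (fun r => PySem.List.pyGetD (PySem.Str.split₀ r) 1 "" == y)).map (fun r => PySem.List.pyGetD (PySem.Str.split₀ r) 0 "")).length = (rep.map (fun r => PySem.List.pyGetD (PySem.Str.split₀ r) 1 "")).count y := by
    intro y
    simp only [List.length_map]
    rw [← List.countP_eq_length_filter, count_map_eq_countP]
  -- A side: the counter reads back counts of second tokens
  have hRD : ∀ y, (rep.foldl (fun d r => d.modify (PySem.List.pyGetD (PySem.Str.split₀ r) 1 "") 0 (· + 1)) seedI).getD y 0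
      = ((rep.map (fun r => PySem.List.pyGetD (PySem.Str.split₀ r) 1 "")).count y : Int) := by
    intro y; rw [getD_count_loop rep (fun r => PySem.List.pyGetD (PySem.Str.split₀ r) 1 "") seedI y, hseedIv, zero_add]
  simp only [hRD]
  rw [PySem.List.foldl_ite_eq_foldl_filter
        (p := fun r => k ≤ ((rep.map (fun r => PySem.List.pyGetD (PySem.Str.split₀ r) 1 "")).count (PySem.List.pyGetD (PySem.Str.split₀ r) 1 "") : Int))
        (f := fun d r => d.modify (PySem.List.pyGetD (PySem.Str.split₀ r) 0 "") 0 (· + 1)) rep seedI]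
  -- A's final dict: keys and values
  have hkA : ((rep.filter (fun r => decide (k ≤ ((rep.map (fun r => PySem.List.pyGetD (PySem.Str.split₀ r) 1 "")).count (PySem.List.pyGetD (PySem.Str.split₀ r) 1 "") : Int)))).foldl (fun d r => d.modify (PySem.List.pyGetD (PySem.Str.split₀ r) 0 "") 0 (· + 1)) seedI).keys = ids := by
    rw [PySem.Dict.keys_foldl_modify_key (rep.filter (fun r => decide (k ≤ ((rep.map (fun r => PySem.List.pyGetD (PySem.Str.split₀ r) 1 "")).count (PySem.List.pyGetD (PySem.Str.split₀ r) 1 "") : Int)))) (fun r => PySem.List.pyGetD (PySem.Str.split₀ r) 0 "") 0 (fun _ _ => (· + 1)) seedI, hseedIk]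
    apply set_update_of_mem
    intro x hx
    rcases List.mem_map.mp hx with ⟨r, hr, rfl⟩
    have hm := List.mem_filter.mp hr
    rw [hids]
    exact (PySem.Set.mem_ofList id_list _).mpr (hpre0 r hm.1 (of_decide_eq_true hm.2))
  have hndA : ((rep.filter (fun r => decide (k ≤ ((rep.map (fun r => PySem.List.pyGetD (PySem.Str.split₀ r) 1 "")).count (PySem.List.pyGetD (PySem.Str.split₀ r) 1 "") : Int)))).foldl (fun d r => d.modify (PySem.List.pyGetD (PySem.Str.split₀ r) 0 "") 0 (· + 1)) seedI).keys.Nodup := by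
    rw [hkA, hids]; exact PySem.Set.nodup_ofList id_list
  rw [PySem.Dict.values_eq_map_keys _ hndA 0, hkA]
  -- B side: the groups dict reads back the per-user reporter lists
  have hG : ∀ y, (rep.foldl (fun d r => d.modify (PySem.List.pyGetD (PySem.Str.split₀ r) 1 "") [] (· ++ [PySem.List.pyGetD (PySem.Str.split₀ r) 0 ""])) seedL).getD y []
      = (rep.filter (fun r => PySem.List.pyGetD (PySem.Str.split₀ r) 1 "" == y)).map (fun r => PySem.List.pyGetD (PySem.Str.split₀ r) 0 "") := by
    intro y; rw [getD_append_loop rep (fun r => PySem.List.pyGetD (PySem.Str.split₀ r) 1 "") (fun r => PySem.List.pyGetD (PySem.Str.split₀ r) 0 "") seedL y, hseedLv, List.nil_append]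
  have hkG : (rep.foldl (fun d r => d.modify (PySem.List.pyGetD (PySem.Str.split₀ r) 1 "") [] (· ++ [PySem.List.pyGetD (PySem.Str.split₀ r) 0 ""])) seedL).keys = ids := by
    rw [PySem.Dict.keys_foldl_modify_key rep (fun r => PySem.List.pyGetD (PySem.Str.split₀ r) 1 "") [] (fun _ r => (· ++ [PySem.List.pyGetD (PySem.Str.split₀ r) 0 ""])) seedL, hseedLk]
    apply set_update_of_mem
    intro x hx
    rcases List.mem_map.mp hx with ⟨r, hr, rfl⟩
    rw [hids]
    exact (PySem.Set.mem_ofList id_list _).mpr (hpre1 r hr)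
  have hndG : (rep.foldl (fun d r => d.modify (PySem.List.pyGetD (PySem.Str.split₀ r) 1 "") [] (· ++ [PySem.List.pyGetD (PySem.Str.split₀ r) 0 ""])) seedL).keys.Nodup := by
    rw [hkG, hids]; exact PySem.Set.nodup_ofList id_list
  rw [PySem.Dict.values_eq_map_keys _ hndG [], hkG]
  simp only [hG]
  rw [PySem.List.foldl_ite_eq_foldl_filter
        (p := fun l : List String => k ≤ (l.length : Int))
        (f := fun d l => l.foldl (fun d r => d.modify r 0 (· + 1)) d) (ids.map (fun y => (rep.filter (fun r => PySem.List.pyGetD (PySem.Str.split₀ r) 1 "" == y)).map (fun r => PySem.List.pyGetD (PySem.Str.split₀ r) 0 ""))) seedI]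
  rw [List.filter_map, ← List.foldl_flatten]
  -- B's final dict: keys and values
  have memflat : ∀ x ∈ ((ids.filter ((fun l : List String => decide (k ≤ (l.length : Int))) ∘ (fun y => (rep.filter (fun r => PySem.List.pyGetD (PySem.Str.split₀ r) 1 "" == y)).map (fun r => PySem.List.pyGetD (PySem.Str.split₀ r) 0 "")))).map (fun y => (rep.filter (fun r => PySem.List.pyGetD (PySem.Str.split₀ r) 1 "" == y)).map (fun r => PySem.List.pyGetD (PySem.Str.split₀ r) 0 ""))).flatten, x ∈ id_list := by
    intro x hx
    rcases List.mem_flatten.mp hx with ⟨l, hl, hxl⟩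
    rcases List.mem_map.mp hl with ⟨y, hy, rfl⟩
    rcases List.mem_map.mp hxl with ⟨r, hr, rfl⟩
    have hm := List.mem_filter.mp hr
    have hky : k ≤ (((rep.filter (fun r => PySem.List.pyGetD (PySem.Str.split₀ r) 1 "" == y)).map (fun r => PySem.List.pyGetD (PySem.Str.split₀ r) 0 "")).length : Int) := by
      have := (List.mem_filter.mp hy).2
      exact of_decide_eq_true this
    rw [hlen y] at hky
    have hry : PySem.List.pyGetD (PySem.Str.split₀ r) 1 "" = y := eq_of_beq hm.2
    exact hpre0 r hm.1 (by rw [hry]; exact hky)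
  have hkB : ((((ids.filter ((fun l : List String => decide (k ≤ (l.length : Int))) ∘ (fun y => (rep.filter (fun r => PySem.List.pyGetD (PySem.Str.split₀ r) 1 "" == y)).map (fun r => PySem.List.pyGetD (PySem.Str.split₀ r) 0 "")))).map (fun y => (rep.filter (fun r => PySem.List.pyGetD (PySem.Str.split₀ r) 1 "" == y)).map (fun r => PySem.List.pyGetD (PySem.Str.split₀ r) 0 ""))).flatten).foldl
      (fun d r => d.modify r 0 (· + 1)) seedI).keys = ids := by
    rw [PySem.Dict.keys_foldl_modify (((ids.filter ((fun l : List String => decide (k ≤ (l.length : Int))) ∘ (fun y => (rep.filter (fun r => PySem.List.pyGetD (PySem.Str.split₀ r) 1 "" == y)).map (fun r => PySem.List.pyGetD (PySem.Str.split₀ r) 0 "")))).map (fun y => (rep.filter (fun r => PySem.List.pyGetD (PySem.Str.split₀ r) 1 "" == y)).map (fun r => PySem.List.pyGetD (PySem.Str.split₀ r) 0 ""))).flatten) 0 (fun _ _ => (· + 1)) seedI,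
        hseedIk]
    apply set_update_of_mem
    intro x hx
    rw [hids]
    exact (PySem.Set.mem_ofList id_list _).mpr (memflat x hx)
  have hndB : ((((ids.filter ((fun l : List String => decide (k ≤ (l.length : Int))) ∘ (fun y => (rep.filter (fun r => PySem.List.pyGetD (PySem.Str.split₀ r) 1 "" == y)).map (fun r => PySem.List.pyGetD (PySem.Str.split₀ r) 0 "")))).map (fun y => (rep.filter (fun r => PySem.List.pyGetD (PySem.Str.split₀ r) 1 "" == y)).map (fun r => PySem.List.pyGetD (PySem.Str.split₀ r) 0 ""))).flatten).foldl
      (fun d r => d.modify r 0 (· + 1)) seedI).keys.Nodup := by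
    rw [hkB, hids]; exact PySem.Set.nodup_ofList id_list
  rw [PySem.Dict.values_eq_map_keys _ hndB 0, hkB]
  -- both sides are maps over ids; compare pointwise
  apply List.map_congr_left
  intro u _
  rw [getD_count_loop (rep.filter (fun r => decide (k ≤ ((rep.map (fun r => PySem.List.pyGetD (PySem.Str.split₀ r) 1 "")).count (PySem.List.pyGetD (PySem.Str.split₀ r) 1 "") : Int)))) (fun r => PySem.List.pyGetD (PySem.Str.split₀ r) 0 "") seedI u, hseedIv, zero_add]
  rw [getD_count_loop (((ids.filter ((fun l : List String => decide (k ≤ (l.length : Int))) ∘ (fun y => (rep.filter (fun r => PySem.List.pyGetD (PySem.Str.split₀ r) 1 "" == y)).map (fun r => PySem.List.pyGetD (PySem.Str.split₀ r) 0 "")))).map (fun y => (rep.filter (fun r => PySem.List.pyGetD (PySem.Str.split₀ r) 1 "" == y)).map (fun r => PySem.List.pyGetD (PySem.Str.split₀ r) 0 ""))).flatten) (fun x => x) seedI u, hseedIv, zero_add,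
      List.map_id_fun', id_eq]
  congr 1
  -- Nat-level counting identity
  have hL : ((rep.filter (fun r => decide (k ≤ ((rep.map (fun r => PySem.List.pyGetD (PySem.Str.split₀ r) 1 "")).count (PySem.List.pyGetD (PySem.Str.split₀ r) 1 "") : Int)))).map (fun r => PySem.List.pyGetD (PySem.Str.split₀ r) 0 "")).count u
      = rep.countP (fun r => (fun r => decide (k ≤ ((rep.map (fun r => PySem.List.pyGetD (PySem.Str.split₀ r) 1 "")).count (PySem.List.pyGetD (PySem.Str.split₀ r) 1 "") : Int))) r && (PySem.List.pyGetD (PySem.Str.split₀ r) 0 "" == u)) := by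
    rw [count_map_eq_countP, List.countP_filter]
    apply List.countP_congr
    intro r _
    simp [Bool.and_comm]
  have hR : (((ids.filter ((fun l : List String => decide (k ≤ (l.length : Int))) ∘ (fun y => (rep.filter (fun r => PySem.List.pyGetD (PySem.Str.split₀ r) 1 "" == y)).map (fun r => PySem.List.pyGetD (PySem.Str.split₀ r) 0 "")))).map (fun y => (rep.filter (fun r => PySem.List.pyGetD (PySem.Str.split₀ r) 1 "" == y)).map (fun r => PySem.List.pyGetD (PySem.Str.split₀ r) 0 ""))).flatten).count u
      = rep.countP (fun r => (fun r => decide (k ≤ ((rep.map (fun r => PySem.List.pyGetD (PySem.Str.split₀ r) 1 "")).count (PySem.List.pyGetD (PySem.Str.split₀ r) 1 "") : Int))) r && (PySem.List.pyGetD (PySem.Str.split₀ r) 0 "" == u)) := by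
    rw [List.count_flatten, List.map_map]
    rw [sum_map_filter_ite ids ((fun l : List String => decide (k ≤ (l.length : Int))) ∘ (fun y => (rep.filter (fun r => PySem.List.pyGetD (PySem.Str.split₀ r) 1 "" == y)).map (fun r => PySem.List.pyGetD (PySem.Str.split₀ r) 0 ""))) (List.count u ∘ (fun y => (rep.filter (fun r => PySem.List.pyGetD (PySem.Str.split₀ r) 1 "" == y)).map (fun r => PySem.List.pyGetD (PySem.Str.split₀ r) 0 "")))]
    have h2 : (fun y => if ((fun l : List String => decide (k ≤ (l.length : Int))) ∘ (fun y => (rep.filter (fun r => PySem.List.pyGetD (PySem.Str.split₀ r) 1 "" == y)).map (fun r => PySem.List.pyGetD (PySem.Str.split₀ r) 0 ""))) y then (List.count u ∘ (fun y => (rep.filter (fun r => PySem.List.pyGetD (PySem.Str.split₀ r) 1 "" == y)).map (fun r => PySem.List.pyGetD (PySem.Str.split₀ r) 0 ""))) y else 0)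
        = fun y => if (fun y => decide (k ≤ ((rep.map (fun r => PySem.List.pyGetD (PySem.Str.split₀ r) 1 "")).count y : Int))) y then
            (rep.filter (fun r => PySem.List.pyGetD (PySem.Str.split₀ r) 1 "" == y)).countP (fun r => PySem.List.pyGetD (PySem.Str.split₀ r) 0 "" == u) else 0 := by
      funext y
      have hc : ((fun l : List String => decide (k ≤ (l.length : Int))) ∘ (fun y => (rep.filter (fun r => PySem.List.pyGetD (PySem.Str.split₀ r) 1 "" == y)).map (fun r => PySem.List.pyGetD (PySem.Str.split₀ r) 0 ""))) y = (fun y => decide (k ≤ ((rep.map (fun r => PySem.List.pyGetD (PySem.Str.split₀ r) 1 "")).count y : Int))) y := by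
        simp only [Function.comp]
        rw [hlen y]
      rw [hc]
      have hcnt : (List.count u ∘ (fun y => (rep.filter (fun r => PySem.List.pyGetD (PySem.Str.split₀ r) 1 "" == y)).map (fun r => PySem.List.pyGetD (PySem.Str.split₀ r) 0 ""))) y
          = (rep.filter (fun r => PySem.List.pyGetD (PySem.Str.split₀ r) 1 "" == y)).countP (fun r => PySem.List.pyGetD (PySem.Str.split₀ r) 0 "" == u) := by
        simp only [Function.comp]
        rw [count_map_eq_countP]
      rw [hcnt]
    rw [h2, grouped_count rep ids (fun r => PySem.List.pyGetD (PySem.Str.split₀ r) 1 "") (fun y => decide (k ≤ ((rep.map (fun r => PySem.List.pyGetD (PySem.Str.split₀ r) 1 "")).count y : Int))) (fun r => PySem.List.pyGetD (PySem.Str.split₀ r) 0 "" == u)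
          (by rw [hids]; exact PySem.Set.nodup_ofList id_list)
          (fun r hr _ => by rw [hids]; exact (PySem.Set.mem_ofList id_list _).mpr (hpre1 r hr))]
  rw [hL, hR]

-- ===== VERDICT (by name: the statement is the Claim_ definition above) =====
theorem solution_spec : Claim_equal_solution := by
  intro id_list report k _ hpre
  exact main_eq id_list report k hpre
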